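-- pv_equiv track=rewrite | github.com/cdpearlman/LLMVis | utils/head_detection.py | format_categorization_summary
-- ===== SOURCE A (Python) =====
-- from typing import Dict, List, Tuple, Optional, Any
--
-- def format_categorization_summary(categorized_heads: Dict[str, List[Dict[str, Any]]]) -> str:
--     """
--     Format categorization results as a human-readable summary.
--
--     Args:
--         categorized_heads: Output from categorize_all_heads
--
--     Returns:
--         Formatted string summary
--     """
--     category_names = {
--         'previous_token': 'Previous-Token Heads',
--         'first_token': 'First/Positional-Token Heads',
--         'bow': 'Bag-of-Words Heads',
--         'syntactic': 'Syntactic Heads',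
--         'other': 'Other Heads'
--     }
--
--     summary = []
--     total_heads = sum(len(heads) for heads in categorized_heads.values())
--
--     summary.append(f"Total Heads: {total_heads}\n")
--     summary.append("=" * 60)
--
--     for category, display_name in category_names.items():
--         heads = categorized_heads.get(category, [])
--         summary.append(f"\n{display_name}: {len(heads)} heads")
--
--         if heads:
--             # Group by layer
--             heads_by_layer = {}
--             for head_info in heads:
--                 layer = head_info['layer']
--                 if layer not in heads_by_layer:
--                     heads_by_layer[layer] = []
--                 heads_by_layer[layer].append(head_info['head'])
--
--             # Format by layer
--             for layer in sorted(heads_by_layer.keys()):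
--                 head_indices = sorted(heads_by_layer[layer])
--                 summary.append(f"  Layer {layer}: Heads {head_indices}")
--
--     return "\n".join(summary)
-- ===== SOURCE B (Python) =====
-- def _runs(pairs):
--     """Split an already (layer, head)-sorted pair list into consecutive runs of equal layer."""
--     if not pairs:
--         return []
--     layer = pairs[0][0]
--     i = 1
--     while i < len(pairs) and pairs[i][0] == layer:
--         i += 1
--     return [(layer, [h for _, h in pairs[:i]])] + _runs(pairs[i:])
--
--
-- def format_categorization_summary(categorized_heads):
--     category_names = [
--         ('previous_token', 'Previous-Token Heads'),
--         ('first_token', 'First/Positional-Token Heads'),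
--         ('bow', 'Bag-of-Words Heads'),
--         ('syntactic', 'Syntactic Heads'),
--         ('other', 'Other Heads'),
--     ]
--     total_heads = sum(len(heads) for heads in categorized_heads.values())
--     lines = [f"Total Heads: {total_heads}\n", "=" * 60]
--     for category, display_name in category_names:
--         heads = categorized_heads.get(category, [])
--         lines.append(f"\n{display_name}: {len(heads)} heads")
--         pairs = sorted((h['layer'], h['head']) for h in heads)
--         for layer, group in _runs(pairs):
--             lines.append(f"  Layer {layer}: Heads {group}")
--     return "\n".join(lines)
-- ===== Notes on version B (the rewrite author's own statement) =====
-- stated objective: alternative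
-- what changed: Replaces A's per-category dict-of-layers grouping (build heads_by_layer, sort its keys, re-sort each layer's head list) with a single sort of (layer, head) pairs followed by a linear scan that emits consecutive equal-layer runs.
import Mathlib
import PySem

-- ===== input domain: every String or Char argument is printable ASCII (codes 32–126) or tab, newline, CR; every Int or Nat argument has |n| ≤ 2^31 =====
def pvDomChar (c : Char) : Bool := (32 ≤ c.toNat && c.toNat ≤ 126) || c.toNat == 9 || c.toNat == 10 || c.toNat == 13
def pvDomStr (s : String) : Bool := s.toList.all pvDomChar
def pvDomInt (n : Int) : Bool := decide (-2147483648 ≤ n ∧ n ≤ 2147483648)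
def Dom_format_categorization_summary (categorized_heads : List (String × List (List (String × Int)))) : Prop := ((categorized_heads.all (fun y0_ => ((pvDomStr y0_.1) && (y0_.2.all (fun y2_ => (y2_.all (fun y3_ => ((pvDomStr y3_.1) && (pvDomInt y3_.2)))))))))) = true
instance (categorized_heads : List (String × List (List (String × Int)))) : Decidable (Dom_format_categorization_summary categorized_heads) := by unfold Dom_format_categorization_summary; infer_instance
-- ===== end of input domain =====

-- B replaces A's per-category dict-of-layers grouping by one (layer, head) sort plus a linear
-- scan over consecutive equal-layer runs (objective: alternative algorithm of similar cost).

-- shared literal data and formatting helpers (the identical dict literal / f-strings of both Pythons)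
def pvCategoryNames : List (String × String) :=
  [("previous_token", "Previous-Token Heads"),
   ("first_token", "First/Positional-Token Heads"),
   ("bow", "Bag-of-Words Heads"),
   ("syntactic", "Syntactic Heads"),
   ("other", "Other Heads")]

-- exact port of the f-string rendering of a Python list of ints: "[a, b, c]"
def pvReprIntList (xs : List Int) : String :=
  "[" ++ PySem.Str.join ", " (xs.map PySem.Int.toStr) ++ "]"

-- h['layer'] / h['head']; the KeyError (none) case is excluded by Pre_, the 0 default is never used there
def pvLayerOf (h : List (String × Int)) : Int := (PySem.Dict.get? (PySem.Dict.mk h) "layer").getD 0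
def pvHeadOf (h : List (String × Int)) : Int := (PySem.Dict.get? (PySem.Dict.mk h) "head").getD 0

-- ===== PORT A =====
def format_categorization_summary (categorized_heads : List (String × List (List (String × Int)))) : String :=
  let total : Int := (categorized_heads.map (fun p => (p.2.length : Int))).sum
  let summary : List String :=
    ["Total Heads: " ++ PySem.Int.toStr total ++ "\n",
     String.ofList (PySem.List.pyRepeat ['='] 60)]      -- "=" * 60
  let summary := pvCategoryNames.foldl (fun summary cd =>
    let heads := PySem.Dict.getD (PySem.Dict.mk categorized_heads) cd.1 []
    let summary := summary ++ ["\n" ++ cd.2 ++ ": " ++ PySem.Int.toStr (heads.length : Int) ++ " heads"]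
    if heads ≠ [] then
      -- group by layer: if layer not in heads_by_layer: heads_by_layer[layer] = []; …[layer].append(head)
      let hbl : PySem.Dict Int (List Int) := heads.foldl (fun d h =>
        let layer := pvLayerOf h
        let d := if d.contains layer then d else d.insert layer []
        d.modify layer [] (fun v => v ++ [pvHeadOf h])) PySem.Dict.empty
      (PySem.List.sorted hbl.keys (fun x => x) false).foldl (fun summary layer =>
        summary ++ ["  Layer " ++ PySem.Int.toStr layer ++ ": Heads " ++
          pvReprIntList (PySem.List.sorted (hbl.getD layer []) (fun x => x) false)]) summary
    else summary) summary
  PySem.Str.join "\n" summary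

-- ===== PORT B =====
-- _runs(pairs): consecutive equal-layer runs of the sorted pair list (pairs[:i] / pairs[i:])
def pvRuns : List (Int × Int) → List (Int × List Int)
  | [] => []
  | (l, h) :: t =>
    (l, h :: (t.takeWhile (fun p => p.1 == l)).map Prod.snd) ::
      pvRuns (t.dropWhile (fun p => p.1 == l))
  termination_by s => s.length
  decreasing_by
    simpa using Nat.lt_succ_of_le (List.length_dropWhile_le _ _)

def format_categorization_summary_alt (categorized_heads : List (String × List (List (String × Int)))) : String :=
  let total : Int := (categorized_heads.map (fun p => (p.2.length : Int))).sum
  let lines : List String :=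
    ["Total Heads: " ++ PySem.Int.toStr total ++ "\n",
     String.ofList (PySem.List.pyRepeat ['='] 60)]      -- "=" * 60
  PySem.Str.join "\n" (pvCategoryNames.foldl (fun lines cd =>
    let heads := PySem.Dict.getD (PySem.Dict.mk categorized_heads) cd.1 []
    let pairs := PySem.List.sorted2 (heads.map (fun h => (pvLayerOf h, pvHeadOf h))) Prod.fst Prod.snd false
    lines ++ ("\n" ++ cd.2 ++ ": " ++ PySem.Int.toStr (heads.length : Int) ++ " heads")
      :: (pvRuns pairs).map (fun g =>
           "  Layer " ++ PySem.Int.toStr g.1 ++ ": Heads " ++ pvReprIntList g.2)) lines)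

-- ===== PRECONDITION & SPEC =====
-- Pre_ excludes exactly the inputs on which A raises KeyError: a head dict, in one of the five
-- category lists, that lacks a "layer" or "head" key (B raises KeyError there too).
def Pre_format_categorization_summary (categorized_heads : List (String × List (List (String × Int)))) : Prop :=
  ∀ c ∈ ["previous_token", "first_token", "bow", "syntactic", "other"],
    ∀ h ∈ PySem.Dict.getD (PySem.Dict.mk categorized_heads) c [],
      (PySem.Dict.get? (PySem.Dict.mk h) "layer").isSome = true ∧
      (PySem.Dict.get? (PySem.Dict.mk h) "head").isSome = true
instance (categorized_heads : List (String × List (List (String × Int)))) : Decidable (Pre_format_categorization_summary categorized_heads) := by unfold Pre_format_categorization_summary; infer_instance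

def pvWitness_format_categorization_summary : (List (String × List (List (String × Int)))) :=
  [("previous_token", [[("layer", 0), ("head", 1)], [("layer", 0), ("head", 0)]]),
   ("other", [[("layer", 2), ("head", 5)]])]

def Spec_format_categorization_summary (categorized_heads : List (String × List (List (String × Int)))) (out : String) : Prop := out = format_categorization_summary_alt categorized_heads
instance (categorized_heads : List (String × List (List (String × Int)))) (out : String) : Decidable (Spec_format_categorization_summary categorized_heads out) := by unfold Spec_format_categorization_summary; infer_instance

-- ===== CLAIM (what is proved, stated in full; the proofs are below) =====
def Claim_equal_format_categorization_summary : Prop := ∀ (categorized_heads : List (String × List (List (String × Int)))), Dom_format_categorization_summary categorized_heads → Pre_format_categorization_summary categorized_heads → Spec_format_categorization_summary categorized_heads (format_categorization_summary categorized_heads)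

-- ===== LEMMAS AND PROOFS =====

-- the (≤-flavoured) lexicographic order sorted2 establishes
def pvLex (a b : Int × Int) : Prop := a.1 < b.1 ∨ (a.1 = b.1 ∧ a.2 ≤ b.2)

-- the strict comparison sorted2 xs Prod.fst Prod.snd false uses, verbatim
def pvBefore (a b : Int × Int) : Bool :=
  decide (a.1 < b.1) || (!decide (b.1 < a.1) && decide (a.2 < b.2))

theorem pvSorted2_eq (xs : List (Int × Int)) :
    PySem.List.sorted2 xs Prod.fst Prod.snd false =
      xs.foldl (fun acc x => PySem.List.insertBy pvBefore x acc) [] := rfl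

theorem pvBefore_true {a b : Int × Int} (h : pvBefore a b = true) : pvLex a b := by
  unfold pvBefore at h; unfold pvLex
  rcases Bool.or_eq_true_iff.1 h with h1 | h2
  · exact Or.inl (of_decide_eq_true h1)
  · rcases Bool.and_eq_true_iff.1 h2 with ⟨h3, h4⟩
    have h4' := of_decide_eq_true h4
    have h5 : ¬ b.1 < a.1 := by simpa using h3
    omega

theorem pvBefore_false {a b : Int × Int} (h : pvBefore a b = false) : pvLex b a := by
  unfold pvBefore at h; unfold pvLex
  rcases Bool.or_eq_false_iff.1 h with ⟨h1, h2⟩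
  have h1' : ¬ a.1 < b.1 := by simpa using h1
  rcases Bool.and_eq_false_iff.1 h2 with h3 | h4
  · have : b.1 < a.1 := by simpa using h3
    omega
  · have : ¬ a.2 < b.2 := by simpa using h4
    omega

theorem pvLex_trans {a b c : Int × Int} (h1 : pvLex a b) (h2 : pvLex b c) : pvLex a c := by
  unfold pvLex at *; omega

theorem pvInsertBy_pairwise (x : Int × Int) (ys : List (Int × Int)) (h : ys.Pairwise pvLex) :
    (PySem.List.insertBy pvBefore x ys).Pairwise pvLex := by
  induction ys with
  | nil => simp [PySem.List.insertBy]
  | cons y t ih =>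
    rw [PySem.List.insertBy.eq_2]
    rcases List.pairwise_cons.1 h with ⟨hy, ht⟩
    by_cases hb : pvBefore x y = true
    · rw [if_pos hb]
      refine List.pairwise_cons.2 ⟨?_, h⟩
      intro q hq
      rcases List.mem_cons.1 hq with rfl | hq'
      · exact pvBefore_true hb
      · exact pvLex_trans (pvBefore_true hb) (hy q hq')
    · rw [if_neg hb]
      refine List.pairwise_cons.2 ⟨?_, ih ht⟩
      intro q hq
      rcases (PySem.List.mem_insertBy _ _ _ _).1 hq with rfl | hq'
      · exact pvBefore_false (by simpa using hb)
      · exact hy q hq'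

theorem pvSorted2_pairwise (xs : List (Int × Int)) :
    (PySem.List.sorted2 xs Prod.fst Prod.snd false).Pairwise pvLex := by
  rw [pvSorted2_eq]
  have main : ∀ (l : List (Int × Int)) (acc : List (Int × Int)), acc.Pairwise pvLex →
      (l.foldl (fun acc x => PySem.List.insertBy pvBefore x acc) acc).Pairwise pvLex := by
    intro l
    induction l with
    | nil => intro acc h; simpa using h
    | cons x t ih =>
      intro acc h
      exact ih _ (pvInsertBy_pairwise x acc h)
  exact main xs [] (by simp)

-- A's grouping step equals the plain modify step
theorem pvStep_eq (d : PySem.Dict Int (List Int)) (l hd : Int) :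
    (let d' := if d.contains l then d else d.insert l []
     d'.modify l [] (fun v => v ++ [hd])) = d.modify l [] (fun v => v ++ [hd]) := by
  by_cases hc : d.contains l
  · simp [hc]
  · have hc' : d.contains l = false := by simpa using hc
    simp only [hc', Bool.false_eq_true, if_false, PySem.Dict.modify]
    rw [PySem.Dict.getD_insert_self, PySem.Dict.insert_insert_self,
      PySem.Dict.getD_of_not_contains _ _ hc']

-- membership in the run keys
theorem pvRuns_keys_mem (s : List (Int × Int)) (x : Int) :
    x ∈ (pvRuns s).map Prod.fst ↔ x ∈ s.map Prod.fst := by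
  induction s using pvRuns.induct with
  | case1 => simp [pvRuns]
  | case2 l h t ih =>
    rw [pvRuns]
    simp only [List.map_cons, List.mem_cons, ih]
    constructor
    · rintro (rfl | hx)
      · exact Or.inl rfl
      · exact Or.inr ((List.mem_map).2 (by
          rcases List.mem_map.1 hx with ⟨q, hq, rfl⟩
          exact ⟨q, (List.dropWhile_sublist _).mem hq, rfl⟩))
    · rintro (rfl | hx)
      · exact Or.inl rfl
      · rcases List.mem_map.1 hx with ⟨q, hq, rfl⟩
        rw [← List.takeWhile_append_dropWhile (p := fun p => p.1 == l) (l := t)] at hq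
        rcases List.mem_append.1 hq with hq1 | hq2
        · exact Or.inl (by simpa using (List.mem_takeWhile_imp hq1))
        · exact Or.inr (List.mem_map.2 ⟨q, hq2, rfl⟩)

theorem pvDropWhile_gt (l : Int) :
    ∀ (t : List (Int × Int)), t.Pairwise pvLex → (∀ q ∈ t, l ≤ q.1) →
      ∀ q ∈ t.dropWhile (fun p => p.1 == l), l < q.1 := by
  intro t
  induction t with
  | nil => simp
  | cons a t' ih =>
    intro hpw hge q hq
    rcases List.pairwise_cons.1 hpw with ⟨ha, ht'⟩
    rw [List.dropWhile_cons] at hq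
    by_cases hal : (a.1 == l) = true
    · rw [if_pos hal] at hq
      exact ih ht' (fun q hq => hge q (List.mem_cons_of_mem _ hq)) q hq
    · rw [if_neg hal] at hq
      have hne : a.1 ≠ l := by simpa using hal
      have hla : l < a.1 := lt_of_le_of_ne (hge a (List.mem_cons_self)) (Ne.symm hne)
      rcases List.mem_cons.1 hq with rfl | hq'
      · exact hla
      · have := ha q hq'
        unfold pvLex at this; omega

theorem pvRuns_keys_pairwise (s : List (Int × Int)) (h : s.Pairwise pvLex) :
    ((pvRuns s).map Prod.fst).Pairwise (· < ·) := by
  induction s using pvRuns.induct with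
  | case1 => simp [pvRuns]
  | case2 l hd t ih =>
    rcases List.pairwise_cons.1 h with ⟨hhd, ht⟩
    rw [pvRuns]
    simp only [List.map_cons]
    refine List.pairwise_cons.2 ⟨?_, ih (ht.sublist (List.dropWhile_sublist _))⟩
    intro x hx
    rcases List.mem_map.1 ((pvRuns_keys_mem _ x).1 hx) with ⟨q, hq, rfl⟩
    exact pvDropWhile_gt l t ht
      (fun q hq => by have := hhd q hq; unfold pvLex at this; omega) q hq

theorem pvRuns_char (s : List (Int × Int)) (h : s.Pairwise pvLex) :
    pvRuns s = ((pvRuns s).map Prod.fst).map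
      (fun l => (l, (s.filter (fun p => p.1 == l)).map Prod.snd)) := by
  induction s using pvRuns.induct with
  | case1 => simp [pvRuns]
  | case2 l hd t ih =>
    rcases List.pairwise_cons.1 h with ⟨hhd, ht⟩
    have hge : ∀ q ∈ t, l ≤ q.1 := fun q hq => by have := hhd q hq; unfold pvLex at this; omega
    have hgt := pvDropWhile_gt l t ht hge
    have ht2pw : (t.dropWhile (fun p => p.1 == l)).Pairwise pvLex :=
      ht.sublist (List.dropWhile_sublist _)
    rw [pvRuns]
    have hsplit : t.takeWhile (fun p => p.1 == l) ++ t.dropWhile (fun p => p.1 == l) = t :=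
      List.takeWhile_append_dropWhile
    have hfilt_t1 : (t.takeWhile (fun p => p.1 == l)).filter (fun p => p.1 == l)
        = t.takeWhile (fun p => p.1 == l) :=
      List.filter_eq_self.2 (fun a ha => List.mem_takeWhile_imp (p := fun p : Int × Int => p.1 == l) ha)
    have hfilt_t2 : (t.dropWhile (fun p => p.1 == l)).filter (fun p => p.1 == l) = [] :=
      List.filter_eq_nil_iff.2 (fun a ha => by have := hgt a ha; simp; omega)
    have hhead : ((l, hd) :: t).filter (fun p => p.1 == l)
        = (l, hd) :: t.takeWhile (fun p => p.1 == l) := by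
      simp only [List.filter_cons]
      rw [if_pos (by simp)]
      conv_lhs => rw [← hsplit]
      rw [List.filter_append, hfilt_t1, hfilt_t2, List.append_nil]
    simp only [List.map_cons]
    congr 1
    · rw [hhead]; simp
    · refine (ih ht2pw).trans (List.map_congr_left ?_)
      intro l' hl'
      rcases List.mem_map.1 ((pvRuns_keys_mem _ l').1 hl') with ⟨q, hq, rfl⟩
      have hlt : l < q.1 := hgt q hq
      have hfs : ((l, hd) :: t).filter (fun p => p.1 == q.1)
          = (t.dropWhile (fun p => p.1 == l)).filter (fun p => p.1 == q.1) := by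
        simp only [List.filter_cons]
        rw [if_neg (by simp; omega)]
        conv_lhs => rw [← hsplit]
        rw [List.filter_append]
        have h1 : (t.takeWhile (fun p => p.1 == l)).filter (fun p => p.1 == q.1) = [] :=
          List.filter_eq_nil_iff.2 (fun a ha => by
            have := List.mem_takeWhile_imp (p := fun p : Int × Int => p.1 == l) ha
            simp at this ⊢; omega)
        rw [h1, List.nil_append]
      rw [hfs]

-- per-category block equality
theorem pvBlock_eq (acc : List String) (heads : List (List (String × Int))) :
    (if heads ≠ [] then
      (PySem.List.sorted (heads.foldl (fun d h =>
          let layer := pvLayerOf h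
          let d := if d.contains layer then d else d.insert layer []
          d.modify layer [] (fun v => v ++ [pvHeadOf h])) PySem.Dict.empty).keys (fun x => x) false).foldl
        (fun summary layer =>
          summary ++ ["  Layer " ++ PySem.Int.toStr layer ++ ": Heads " ++
            pvReprIntList (PySem.List.sorted ((heads.foldl (fun d h =>
              let layer := pvLayerOf h
              let d := if d.contains layer then d else d.insert layer []
              d.modify layer [] (fun v => v ++ [pvHeadOf h])) PySem.Dict.empty).getD layer []) (fun x => x) false)]) acc
    else acc)
    = acc ++ (pvRuns (PySem.List.sorted2 (heads.map (fun h => (pvLayerOf h, pvHeadOf h))) Prod.fst Prod.snd false)).map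
        (fun g => "  Layer " ++ PySem.Int.toStr g.1 ++ ": Heads " ++ pvReprIntList g.2) := by
  by_cases hh : heads = []
  · subst hh
    simp [pvSorted2_eq, pvRuns]
  · rw [if_pos hh]
    have hfold : heads.foldl (fun d h =>
          let layer := pvLayerOf h
          let d := if d.contains layer then d else d.insert layer []
          d.modify layer [] (fun v => v ++ [pvHeadOf h])) PySem.Dict.empty
        = (heads.map (fun h => (pvLayerOf h, pvHeadOf h))).foldl
            (fun d p => d.modify p.1 [] (fun v => v ++ [p.2])) PySem.Dict.empty := by
      rw [List.foldl_map]
      exact PySem.List.foldl_congr_mem _ _ _ _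
        (fun acc h _ => pvStep_eq acc (pvLayerOf h) (pvHeadOf h))
    set ps := heads.map (fun h => (pvLayerOf h, pvHeadOf h)) with hps
    set s := PySem.List.sorted2 ps Prod.fst Prod.snd false with hs
    have hspw : s.Pairwise pvLex := pvSorted2_pairwise ps
    have hsperm : s.Perm ps := PySem.List.sorted2_perm ps Prod.fst Prod.snd false
    rw [PySem.List.foldl_append_singleton_eq_map, hfold]
    rw [PySem.Dict.keys_foldl_modify_key, PySem.Dict.keys_empty, PySem.Set.update_nil_left]
    simp only [PySem.Dict.getD_foldl_modify_append, PySem.Dict.getD_empty, List.nil_append]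
    -- sorted distinct layers = the run keys
    have hkeys : PySem.List.sorted (PySem.Set.ofList (ps.map Prod.fst)) (fun x => x) false
        = (pvRuns s).map Prod.fst := by
      apply PySem.List.sorted_eq_of_perm_of_pairwise_lt
      · refine (List.perm_ext_iff_of_nodup ?_ (PySem.Set.nodup_ofList _)).2 ?_
        · exact (pvRuns_keys_pairwise s hspw).nodup
        · intro x
          rw [pvRuns_keys_mem, PySem.Set.mem_ofList, (hsperm.map Prod.fst).mem_iff]
      · exact pvRuns_keys_pairwise s hspw
    -- each layer's sorted head list = the run's head list
    have hval : ∀ l : Int,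
        PySem.List.sorted ((ps.filter (fun p => p.1 == l)).map Prod.snd) (fun x => x) false
          = (s.filter (fun p => p.1 == l)).map Prod.snd := by
      intro l
      apply PySem.List.sorted_id_eq_of_perm_of_pairwise
      · exact ((hsperm.filter _).map _)
      · refine List.pairwise_map.2 ?_
        have hf : (s.filter (fun p => p.1 == l)).Pairwise pvLex :=
          List.Pairwise.sublist List.filter_sublist hspw
        refine hf.imp_of_mem ?_
        intro a b ha hb hab
        have ha1 : a.1 = l := by simpa using (List.of_mem_filter ha)
        have hb1 : b.1 = l := by simpa using (List.of_mem_filter hb)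
        unfold pvLex at hab; omega
    calc acc ++ (PySem.List.sorted (PySem.Set.ofList (ps.map Prod.fst)) (fun x => x) false).map
            (fun layer => "  Layer " ++ PySem.Int.toStr layer ++ ": Heads " ++
              pvReprIntList (PySem.List.sorted ((ps.filter (fun p => p.1 == layer)).map Prod.snd) (fun x => x) false))
        = acc ++ ((pvRuns s).map Prod.fst).map
            (fun layer => "  Layer " ++ PySem.Int.toStr layer ++ ": Heads " ++
              pvReprIntList ((s.filter (fun p => p.1 == layer)).map Prod.snd)) := by
          rw [hkeys]
          congr 1
          exact List.map_congr_left (fun l _ => by rw [hval l])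
      _ = acc ++ (((pvRuns s).map Prod.fst).map
            (fun l => (l, (s.filter (fun p => p.1 == l)).map Prod.snd))).map
            (fun g => "  Layer " ++ PySem.Int.toStr g.1 ++ ": Heads " ++ pvReprIntList g.2) := by
          simp only [List.map_map, Function.comp_def]
      _ = acc ++ (pvRuns s).map
            (fun g => "  Layer " ++ PySem.Int.toStr g.1 ++ ": Heads " ++ pvReprIntList g.2) := by
          rw [← pvRuns_char s hspw]

-- ===== VERDICT (by name: the statement is the Claim_ definition above) =====
theorem format_categorization_summary_spec : Claim_equal_format_categorization_summary := by
  intro categorized_heads _hdom _hpre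
  unfold Spec_format_categorization_summary
  simp only [format_categorization_summary, format_categorization_summary_alt]
  refine congrArg (PySem.Str.join "\n") ?_
  refine PySem.List.foldl_congr_mem _ _ _ _ ?_
  intro acc cd _
  exact (pvBlock_eq
    (acc ++ ["\n" ++ cd.2 ++ ": " ++
      PySem.Int.toStr ((PySem.Dict.getD (PySem.Dict.mk categorized_heads) cd.1 []).length : Int) ++ " heads"])
    (PySem.Dict.getD (PySem.Dict.mk categorized_heads) cd.1 [])).trans (by simp)
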